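-- pv_equiv track=rewrite | github.com/jbottelb/ResumeCode | programming_challenges/challenge10/program.py | build
-- ===== SOURCE A (Python) =====
-- def build(bricks):
--     # take care of 4s
--     rows   = int(bricks[3])
--     ones   = int(bricks[0])
--     twos   = int(bricks[1])
--     threes = int(bricks[2])
--
--     # take care of 3
--     while threes > 0:
--         if ones > 0:
--             ones -= 1
--         threes -= 1
--         rows += 1
--
--     # and 2's
--     while twos > 0:
--         twos -= 1
--         if twos > 0:
--             twos -= 1
--         elif ones > 0:
--             ones -= 2   # ones can go negative
--         rows += 1
--
--     # and 1's
--     while ones > 0: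
--         ones -= 4
--         rows += 1
--
--     return rows
-- ===== SOURCE B (Python) =====
-- def build(bricks):
--     # closed-form arithmetic replacing the three counting loops
--     ones, twos, threes, rows = bricks[0], bricks[1], bricks[2], bricks[3]
--     t3 = max(threes, 0)
--     rows += t3
--     if ones > 0:
--         ones = max(ones - t3, 0)
--     t2 = max(twos, 0)
--     rows += (t2 + 1) // 2
--     if t2 % 2 == 1 and ones > 0:
--         ones -= 2
--     if ones > 0:
--         rows += (ones + 3) // 4
--     return rows
-- ===== Notes on version B (the rewrite author's own statement) =====
-- stated objective: faster
-- what changed: Replaced the three counting while-loops by closed-form arithmetic (max/ceiling divisions), making the result O(1) in the brick counts.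
import Mathlib
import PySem

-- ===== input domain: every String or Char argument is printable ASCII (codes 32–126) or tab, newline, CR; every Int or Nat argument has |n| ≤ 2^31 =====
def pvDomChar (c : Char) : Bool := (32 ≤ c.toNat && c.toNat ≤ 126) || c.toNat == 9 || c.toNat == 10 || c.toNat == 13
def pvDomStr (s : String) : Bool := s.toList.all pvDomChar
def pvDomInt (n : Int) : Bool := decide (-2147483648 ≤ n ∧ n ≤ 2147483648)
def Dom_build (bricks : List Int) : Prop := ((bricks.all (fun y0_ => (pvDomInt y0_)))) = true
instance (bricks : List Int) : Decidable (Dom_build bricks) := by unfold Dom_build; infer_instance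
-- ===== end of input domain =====

-- B replaces A's three counting loops by closed-form arithmetic; return-value equivalence only.

-- ===== PORT A =====
-- while threes > 0: if ones > 0: ones -= 1; threes -= 1; rows += 1
def buildLoop3 (threes ones rows : Int) : Int × Int :=
  if h : threes > 0 then
    buildLoop3 (threes - 1) (if ones > 0 then ones - 1 else ones) (rows + 1)
  else (ones, rows)
termination_by threes.toNat
decreasing_by omega

-- while twos > 0: twos -= 1; if twos > 0: twos -= 1 elif ones > 0: ones -= 2; rows += 1
def buildLoop2 (twos ones rows : Int) : Int × Int :=
  if h : twos > 0 then
    if twos - 1 > 0 then buildLoop2 (twos - 2) ones (rows + 1)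
    else if ones > 0 then buildLoop2 (twos - 1) (ones - 2) (rows + 1)
    else buildLoop2 (twos - 1) ones (rows + 1)
  else (ones, rows)
termination_by twos.toNat
decreasing_by all_goals omega

-- while ones > 0: ones -= 4; rows += 1
def buildLoop1 (ones rows : Int) : Int :=
  if h : ones > 0 then buildLoop1 (ones - 4) (rows + 1) else rows
termination_by ones.toNat
decreasing_by omega

def build (bricks : List Int) : Int :=
  let rows   := (PySem.List.pyGet? bricks 3).getD 0
  let ones   := (PySem.List.pyGet? bricks 0).getD 0
  let twos   := (PySem.List.pyGet? bricks 1).getD 0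
  let threes := (PySem.List.pyGet? bricks 2).getD 0
  let (ones, rows) := buildLoop3 threes ones rows
  let (ones, rows) := buildLoop2 twos ones rows
  buildLoop1 ones rows

-- ===== PORT B =====
def build_alt (bricks : List Int) : Int :=
  let ones   := (PySem.List.pyGet? bricks 0).getD 0
  let twos   := (PySem.List.pyGet? bricks 1).getD 0
  let threes := (PySem.List.pyGet? bricks 2).getD 0
  let rows   := (PySem.List.pyGet? bricks 3).getD 0
  let t3 := max threes 0
  let rows := rows + t3
  let ones := if ones > 0 then max (ones - t3) 0 else ones
  let t2 := max twos 0
  let rows := rows + PySem.Int.floordiv (t2 + 1) 2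
  let ones := if PySem.Int.mod t2 2 = 1 ∧ ones > 0 then ones - 2 else ones
  if ones > 0 then rows + PySem.Int.floordiv (ones + 3) 4 else rows

-- ===== PRECONDITION & SPEC =====
-- A indexes bricks[0..3], so it raises IndexError on lists shorter than 4.
def Pre_build (bricks : List Int) : Prop := 4 ≤ bricks.length
instance (bricks : List Int) : Decidable (Pre_build bricks) := by unfold Pre_build; infer_instance
def pvWitness_build : List Int := [2, 3, 1, 5]

def Spec_build (bricks : List Int) (out : Int) : Prop := out = build_alt bricks
instance (bricks : List Int) (out : Int) : Decidable (Spec_build bricks out) := by unfold Spec_build; infer_instance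

-- ===== CLAIM (what is proved, stated in full; the proofs are below) =====
def Claim_equal_build : Prop := ∀ (bricks : List Int), Dom_build bricks → Pre_build bricks → Spec_build bricks (build bricks)

-- ===== LEMMAS AND PROOFS =====
theorem buildLoop3_eq (t o r : Int) :
    buildLoop3 t o r = ((if o > 0 then max (o - max t 0) 0 else o), r + max t 0) := by
  fun_induction buildLoop3 t o r with
  | case1 t o r h ih =>
    simp only [dite_eq_ite] at ih
    rw [ih, Prod.mk.injEq]
    constructor
    · split_ifs <;> omega
    · omega
  | case2 t o r h =>
    rw [Prod.mk.injEq]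
    constructor
    · split_ifs <;> omega
    · omega

theorem buildLoop2_eq (t o r : Int) :
    buildLoop2 t o r =
      ((if PySem.Int.mod (max t 0) 2 = 1 ∧ o > 0 then o - 2 else o),
       r + PySem.Int.floordiv (max t 0 + 1) 2) := by
  fun_induction buildLoop2 t o r with
  | case1 t o r h h2 ih =>
    rw [ih]
    simp only [PySem.Int.mod, PySem.Int.floordiv, Int.fdiv_eq_ediv, Int.fmod_eq_emod] at *
    rw [Prod.mk.injEq]
    constructor
    · split_ifs <;> omega
    · omega
  | case2 t o r h h2 h3 ih =>
    rw [ih]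
    simp only [PySem.Int.mod, PySem.Int.floordiv, Int.fdiv_eq_ediv, Int.fmod_eq_emod] at *
    rw [Prod.mk.injEq]
    constructor
    · split_ifs <;> omega
    · omega
  | case3 t o r h h2 h3 ih =>
    rw [ih]
    simp only [PySem.Int.mod, PySem.Int.floordiv, Int.fdiv_eq_ediv, Int.fmod_eq_emod] at *
    rw [Prod.mk.injEq]
    constructor
    · split_ifs <;> omega
    · omega
  | case4 t o r h =>
    simp only [PySem.Int.mod, PySem.Int.floordiv, Int.fdiv_eq_ediv, Int.fmod_eq_emod]
    rw [Prod.mk.injEq]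
    constructor
    · split_ifs <;> omega
    · omega

theorem buildLoop1_eq (o r : Int) :
    buildLoop1 o r = r + (if o > 0 then PySem.Int.floordiv (o + 3) 4 else 0) := by
  fun_induction buildLoop1 o r with
  | case1 o r h ih =>
    rw [ih]
    simp only [PySem.Int.floordiv, Int.fdiv_eq_ediv]
    split_ifs <;> omega
  | case2 o r h => simp [h]

-- ===== VERDICT (by name: the statement is the Claim_ definition above) =====
theorem build_spec : Claim_equal_build := by
  intro bricks _ _
  unfold Spec_build build build_alt
  simp only [buildLoop3_eq, buildLoop2_eq, buildLoop1_eq, PySem.Int.mod, PySem.Int.floordiv,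
    Int.fdiv_eq_ediv, Int.fmod_eq_emod]
  split_ifs <;> omega
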